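-- pv_equiv track=rewrite | github.com/hllibrkaya/codestepbystep-solutions | stepbystep_solutions/is_all_vowels.py | is_all_vowels
-- ===== SOURCE A (Python) =====
-- def is_all_vowels(s):
--     vowels = 'AEIOUaeiou'
--     count=0
--     for i in s:
--         if (i in vowels):
--             count += 1
--     if(count==len(s)):
--         return True
--     else:
--         return False
-- ===== SOURCE B (Python) =====
-- def is_all_vowels(s):
--     return set(s) <= set('AEIOUaeiou')
-- ===== Notes on version B (the rewrite author's own statement) =====
-- stated objective: idiomatic
-- what changed: Replaces A's per-character counting loop and final length comparison with deduplicating the characters into a set and one subset test against the vowel set.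
import Mathlib
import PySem

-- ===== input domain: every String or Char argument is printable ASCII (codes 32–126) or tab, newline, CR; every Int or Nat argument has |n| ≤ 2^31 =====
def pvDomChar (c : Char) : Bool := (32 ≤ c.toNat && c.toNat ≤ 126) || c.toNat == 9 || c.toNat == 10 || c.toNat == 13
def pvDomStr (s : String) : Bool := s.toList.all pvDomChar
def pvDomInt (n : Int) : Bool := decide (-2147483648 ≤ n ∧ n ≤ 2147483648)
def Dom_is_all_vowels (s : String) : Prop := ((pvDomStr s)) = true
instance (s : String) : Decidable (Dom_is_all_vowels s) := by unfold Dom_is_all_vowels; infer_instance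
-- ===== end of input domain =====

-- B replaces A's per-character vowel counting and length comparison with a dedup-to-set and one subset test (idiomatic rewrite, same cost class).


-- ===== PORT A =====
-- count the vowel characters of s, then compare the count with len(s)
def is_all_vowels (s : String) : Bool :=
  let vowels : List Char := "AEIOUaeiou".toList
  let count : Nat := s.toList.foldl (fun count i => if vowels.contains i then count + 1 else count) 0
  if count = PySem.Str.len s then true else false

-- ===== PORT B =====
-- set(s) <= set('AEIOUaeiou')
def is_all_vowels_alt (s : String) : Bool :=
  PySem.Set.issubset (PySem.Set.ofList s.toList) (PySem.Set.ofList "AEIOUaeiou".toList)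

-- ===== PRECONDITION & SPEC =====
def Spec_is_all_vowels (s : String) (out : Bool) : Prop := out = is_all_vowels_alt s
instance (s : String) (out : Bool) : Decidable (Spec_is_all_vowels s out) := by unfold Spec_is_all_vowels; infer_instance

-- ===== CLAIM (what is proved, stated in full; the proofs are below) =====
def Claim_equal_is_all_vowels : Prop := ∀ (s : String), Dom_is_all_vowels s → Spec_is_all_vowels s (is_all_vowels s)

-- ===== LEMMAS AND PROOFS =====

-- A's counting loop computes a countP
theorem pv_foldl_count (V : List Char) (l : List Char) (n : Nat) :
    l.foldl (fun count i => if V.contains i then count + 1 else count) n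
      = n + l.countP (fun i => V.contains i) := by
  induction l generalizing n with
  | nil => simp
  | cons a t ih =>
    simp only [List.foldl_cons, List.countP_cons]
    by_cases h : V.contains a = true
    · rw [if_pos h, if_pos h, ih]; omega
    · rw [if_neg h, if_neg h, ih]; omega

-- ===== VERDICT (by name: the statement is the Claim_ definition above) =====
theorem is_all_vowels_spec : Claim_equal_is_all_vowels := by
  intro s _
  unfold Spec_is_all_vowels is_all_vowels is_all_vowels_alt
  simp only [pv_foldl_count, Nat.zero_add, PySem.Str.len]
  rcases Bool.eq_false_or_eq_true
      (PySem.Set.issubset (PySem.Set.ofList s.toList) (PySem.Set.ofList "AEIOUaeiou".toList))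
      with hb | hb <;> rw [hb]
  · -- subset: every char is a vowel, so countP = length
    rw [if_pos]
    have : ∀ a ∈ s.toList, ("AEIOUaeiou".toList.contains a) = true := ?_
    · exact_mod_cast List.countP_eq_length.mpr this
    intro a ha
    have := (PySem.Set.issubset_iff
      (s := PySem.Set.ofList s.toList) (t := PySem.Set.ofList "AEIOUaeiou".toList)).mp hb
      a (by rw [PySem.Set.mem_ofList]; exact ha)
    simpa [PySem.Set.mem_ofList, List.contains_iff_mem] using this
  · -- not a subset: some char of s is not a vowel, so countP < length
    rw [if_neg]
    intro hc
    have hall := List.countP_eq_length.mp (Nat.cast_inj.mp hc)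
    have := (not_iff_not.mpr (PySem.Set.issubset_iff
      (s := PySem.Set.ofList s.toList) (t := PySem.Set.ofList "AEIOUaeiou".toList))).mp
      (by rw [hb]; exact Bool.false_ne_true)
    push_neg at this
    obtain ⟨x, hx, hnx⟩ := this
    rw [PySem.Set.mem_ofList] at hx
    exact hnx (by simpa [PySem.Set.mem_ofList, List.contains_iff_mem] using hall x hx)
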